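-- pv_equiv track=rewrite | github.com/blocsu/Python | Lecture_4/string_check/main.py | f
-- ===== SOURCE A (Python) =====
-- from collections import Counter
--
-- def f(s):
--     d = Counter(s)
--     lst = d.values()
--     d2 = Counter(lst)
--     keys = []
--     result = 0
--     if len(d2) == 1:
--         return True
--     if len(d2) == 2:
--         for v, k in d2.items():
--             result = abs(result) - v
--             keys.append(k)
--         if abs(result) == 1 and  1 in keys:
--             return True
--         else:
--             return False
--     else:
--         return False
-- ===== SOURCE B (Python) =====
-- from collections import Counter
--
-- def f(s):
--     # Single pass over the character counts with a two-register state machine: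
--     # a/b hold the (at most two) distinct count values seen, na/nb their multiplicities.
--     a = b = None
--     na = nb = 0
--     for c in Counter(s).values():
--         if c == a:
--             na += 1
--         elif c == b:
--             nb += 1
--         elif a is None:
--             a, na = c, 1
--         elif b is None:
--             b, nb = c, 1
--         else:
--             return False
--     if b is None:
--         return a is not None
--     return abs(a - b) == 1 and (na == 1 or nb == 1)
-- ===== Notes on version B (the rewrite author's own statement) =====
-- stated objective: alternative
-- what changed: B replaces A's second Counter over the counts plus the abs-accumulator/keys loop by a single streaming pass over the character counts with a two-register state machine (a,b,na,nb) that early-returns False on a third distinct value.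
import Mathlib
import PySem

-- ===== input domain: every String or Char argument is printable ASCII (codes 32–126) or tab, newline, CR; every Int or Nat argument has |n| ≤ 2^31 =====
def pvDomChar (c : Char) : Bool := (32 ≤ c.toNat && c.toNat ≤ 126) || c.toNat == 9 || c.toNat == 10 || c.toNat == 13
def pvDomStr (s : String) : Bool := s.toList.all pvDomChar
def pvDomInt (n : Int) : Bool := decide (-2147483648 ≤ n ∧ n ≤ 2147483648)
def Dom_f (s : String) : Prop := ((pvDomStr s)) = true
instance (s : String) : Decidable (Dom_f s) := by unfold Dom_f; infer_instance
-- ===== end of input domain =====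

-- B replaces A's second Counter and abs-accumulator/keys loop by one streaming pass over the
-- character counts with a two-register state machine (objective: alternative decomposition).

-- ===== PORT A =====
def f (s : String) : Bool :=
  let d := PySem.Dict.counter s.toList
  let lst := d.values
  let d2 := PySem.Dict.counter lst
  if d2.size = 1 then
    true
  else if d2.size = 2 then
    -- for v, k in d2.items(): result = abs(result) - v; keys.append(k)
    let st := d2.items.foldl (fun (p : Int × List Int) vk => (|p.1| - vk.1, p.2 ++ [vk.2])) ((0 : Int), ([] : List Int))
    if |st.1| = 1 ∧ (1 : Int) ∈ st.2 then true else false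
  else false

-- ===== PORT B =====
-- the 'for c in Counter(s).values()' loop of Source B: a?/b? are the registers a/b (None = Option.none),
-- na/nb their multiplicity counters; the final 'return's after the loop are the base case.
def fAltLoop : List Int → Option Int → Option Int → Int → Int → Bool
  | [], a?, b?, na, nb =>
      match b? with
      | none => a?.isSome                        -- if b is None: return a is not None
      | some bv =>
        match a? with
        | some av => decide (|av - bv| = 1) && (decide (na = 1) || decide (nb = 1))
        | none => false                          -- unreachable: b is set only after a
  | c :: rest, a?, b?, na, nb =>
      if a? = some c then fAltLoop rest a? b? (na + 1) nb
      else if b? = some c then fAltLoop rest a? b? na (nb + 1)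
      else
        match a? with
        | none => fAltLoop rest (some c) b? 1 nb
        | some _ =>
          match b? with
          | none => fAltLoop rest a? (some c) na 1
          | some _ => false                      -- third distinct count value: return False

def f_alt (s : String) : Bool :=
  fAltLoop (PySem.Dict.counter s.toList).values none none 0 0

-- ===== PRECONDITION & SPEC =====
def Spec_f (s : String) (out : Bool) : Prop := out = f_alt s
instance (s : String) (out : Bool) : Decidable (Spec_f s out) := by unfold Spec_f; infer_instance

-- ===== CLAIM (what is proved, stated in full; the proofs are below) =====
def Claim_equal_f : Prop := ∀ (s : String), Dom_f s → Spec_f s (f s)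

-- ===== LEMMAS AND PROOFS =====

-- common meeting point of the two proofs: the verdict as a function of the list of counts
def pvSpecB (L : List Int) : Bool :=
  match PySem.Set.ofList L with
  | [] => false
  | [_] => true
  | [a, b] => decide (|a - b| = 1) && (decide (L.count a = 1) || decide (L.count b = 1))
  | _ => false

-- every value of Counter(s) is positive
theorem pv_counts_pos (cs : List Char) (x : Int) (hx : x ∈ (PySem.Dict.counter cs).values) : 0 < x := by
  have : (PySem.Dict.counter cs).values
      = (PySem.Set.ofList cs).map (fun k => ((cs.count k : Int))) := by
    show ((PySem.Dict.counter cs).items).map (·.2) = _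
    rw [PySem.Dict.items_counter]
    simp
  rw [this] at hx
  simp only [List.mem_map] at hx
  obtain ⟨c, hc, rfl⟩ := hx
  have hc' : c ∈ cs := (PySem.Set.mem_ofList cs c).mp hc
  exact_mod_cast List.count_pos_iff.mpr hc'

-- A's tail equals pvSpecB on any list of positive counts
theorem pv_A_spec (L : List Int) (hpos : ∀ x ∈ L, 0 < x) :
    (if (PySem.Dict.counter L).size = 1 then true
     else if (PySem.Dict.counter L).size = 2 then
       (let st := (PySem.Dict.counter L).items.foldl
          (fun (p : Int × List Int) vk => (|p.1| - vk.1, p.2 ++ [vk.2])) ((0 : Int), ([] : List Int));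
        if |st.1| = 1 ∧ (1 : Int) ∈ st.2 then true else false)
     else false) = pvSpecB L := by
  have hsize : (PySem.Dict.counter L).size = (PySem.Set.ofList L : List Int).length := by
    show ((PySem.Dict.counter L).items).length = _
    rw [PySem.Dict.items_counter]; simp
  have hitems := PySem.Dict.items_counter L
  unfold pvSpecB
  rcases hSs : (PySem.Set.ofList L : List Int) with _ | ⟨v₁, _ | ⟨v₂, _ | ⟨v₃, rest⟩⟩⟩ <;>
    rw [hSs] at hsize hitems
  · simp [hsize]
  · simp [hsize]
  · have hv₁ : 0 < v₁ := hpos v₁ (by rw [← PySem.Set.mem_ofList L v₁, hSs]; simp)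
    rw [hsize, hitems]
    norm_num
    rw [abs_of_pos hv₁]
    rw [Bool.eq_iff_iff]
    simp only [Bool.or_eq_true, Bool.and_eq_true, decide_eq_true_eq]
    constructor
    · rintro ⟨h1, h2⟩; exact ⟨h1, by omega⟩
    · rintro ⟨h1, h2⟩; exact ⟨h1, by omega⟩
  · rw [hsize]
    have h1 : ¬ ((rest.length + 1 + 1 + 1) = 1) := by omega
    have h2 : ¬ ((rest.length + 1 + 1 + 1) = 2) := by omega
    simp only [List.length_cons, h1, h2, if_false]

theorem pv_loop2 (a b : Int) (hab : a ≠ b) :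
    ∀ (R : List Int) (na nb : Int),
    fAltLoop R (some a) (some b) na nb =
      if ∀ c ∈ R, c = a ∨ c = b then
        decide (|a - b| = 1) && (decide (na + (R.count a : Int) = 1) || decide (nb + (R.count b : Int) = 1))
      else false := by
  intro R
  induction R with
  | nil => intro na nb; simp [fAltLoop]
  | cons c rest ih =>
    intro na nb
    by_cases hca : c = a
    · subst hca
      rw [show fAltLoop (c :: rest) (some c) (some b) na nb
            = fAltLoop rest (some c) (some b) (na + 1) nb from by simp [fAltLoop]]
      rw [ih]
      have hc : (∀ x ∈ c :: rest, x = c ∨ x = b) ↔ (∀ x ∈ rest, x = c ∨ x = b) := by simp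
      rw [if_congr hc rfl rfl]
      split_ifs with h
      · have hcb : rest.count b = (c :: rest).count b := by
          rw [List.count_cons]
          simp only [beq_iff_eq]
          rw [if_neg hab]
          ring
        have hca' : (c :: rest).count c = rest.count c + 1 := by
          rw [List.count_cons]; simp
        rw [Bool.eq_iff_iff]
        simp only [Bool.or_eq_true, Bool.and_eq_true, decide_eq_true_eq, hca', ← hcb]
        push_cast
        constructor <;> rintro ⟨h1, h2⟩ <;> exact ⟨h1, by omega⟩
      · rfl
    · by_cases hcb : c = b
      · subst hcb
        rw [show fAltLoop (c :: rest) (some a) (some c) na nb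
              = fAltLoop rest (some a) (some c) na (nb + 1) from by
          simp [fAltLoop, Ne.symm hca]]
        rw [ih]
        have hc : (∀ x ∈ c :: rest, x = a ∨ x = c) ↔ (∀ x ∈ rest, x = a ∨ x = c) := by simp
        rw [if_congr hc rfl rfl]
        split_ifs with h
        · have h1 : (c :: rest).count a = rest.count a := by
            rw [List.count_cons]
            simp only [beq_iff_eq]
            rw [if_neg (Ne.symm (fun h : a = c => hca h.symm))]
            ring
          have h2 : (c :: rest).count c = rest.count c + 1 := by
            rw [List.count_cons]; simp
          rw [Bool.eq_iff_iff]
          simp only [Bool.or_eq_true, Bool.and_eq_true, decide_eq_true_eq, h1, h2]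
          push_cast
          constructor <;> rintro ⟨g1, g2⟩ <;> exact ⟨g1, by omega⟩
        · rfl
      · rw [show fAltLoop (c :: rest) (some a) (some b) na nb = false from by
          simp [fAltLoop, Ne.symm hca, Ne.symm hcb]]
        have : ¬ (∀ x ∈ c :: rest, x = a ∨ x = b) := by
          intro h; rcases h c (by simp) with h | h <;> [exact hca h; exact hcb h]
        rw [if_neg this]

theorem pv_discard_filter (S : List Int) (c : Int) :
    PySem.Set.discard S c = S.filter (fun x => !(x == c)) := by
  simp [PySem.Set.discard]

theorem pv_loop1 (a : Int) :
    ∀ (R : List Int) (na : Int),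
    fAltLoop R (some a) none na 0 =
      (match (PySem.Set.ofList R).filter (fun x => !(x == a)) with
       | [] => true
       | [b] => decide (|a - b| = 1) && (decide (na + (R.count a : Int) = 1) || decide ((R.count b : Int) = 1))
       | _ => false) := by
  intro R
  induction R with
  | nil => intro na; simp [fAltLoop, PySem.Set.ofList]
  | cons c rest ih =>
    intro na
    rw [PySem.Set.ofList_cons, pv_discard_filter]
    by_cases hca : c = a
    · subst hca
      rw [show fAltLoop (c :: rest) (some c) none na 0
            = fAltLoop rest (some c) none (na + 1) 0 from by simp [fAltLoop]]
      rw [ih]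
      have hfilter : (c :: (PySem.Set.ofList rest).filter (fun x => !(x == c))).filter (fun x => !(x == c))
          = (PySem.Set.ofList rest).filter (fun x => !(x == c)) := by
        simp [List.filter_filter]
      rw [hfilter]
      have hcount : (c :: rest).count c = rest.count c + 1 := by
        rw [List.count_cons]; simp
      rcases hm : (PySem.Set.ofList rest).filter (fun x => !(x == c)) with _ | ⟨b, _ | t⟩
      · rfl
      · have hbc : ¬ (b = c) := by
          have := List.of_mem_filter (l := PySem.Set.ofList rest) (p := fun x => !(x == c)) (a := b) (by rw [hm]; simp)
          simpa using this
        have hcb : (c :: rest).count b = rest.count b := by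
          rw [List.count_cons]
          simp only [beq_iff_eq]
          rw [if_neg (fun h : c = b => hbc h.symm)]
          ring
        rw [Bool.eq_iff_iff]
        simp only [Bool.or_eq_true, Bool.and_eq_true, decide_eq_true_eq, hcount, hcb]
        push_cast
        constructor <;> rintro ⟨g1, g2⟩ <;> exact ⟨g1, by omega⟩
      · rfl
    · rw [show fAltLoop (c :: rest) (some a) none na 0
            = fAltLoop rest (some a) (some c) na 1 from by simp [fAltLoop, Ne.symm hca]]
      rw [pv_loop2 a c (Ne.symm hca)]
      have hkeep : (c :: (PySem.Set.ofList rest).filter (fun x => !(x == c))).filter (fun x => !(x == a))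
          = c :: (PySem.Set.ofList rest).filter (fun x => !(x == c) && !(x == a)) := by
        rw [List.filter_cons_of_pos (by simp [hca]), List.filter_filter]
        exact congrArg (c :: ·) (List.filter_congr (fun x _ => Bool.and_comm _ _))
      rw [hkeep]
      by_cases hall : ∀ x ∈ rest, x = a ∨ x = c
      · rw [if_pos hall]
        have hT : (PySem.Set.ofList rest).filter (fun x => !(x == c) && !(x == a)) = [] := by
          rw [List.filter_eq_nil_iff]
          intro x hx
          rcases hall x ((PySem.Set.mem_ofList rest x).mp hx) with h | h <;> simp [h]
        rw [hT]
        have h1 : (c :: rest).count a = rest.count a := by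
          rw [List.count_cons]
          simp only [beq_iff_eq]
          rw [if_neg hca]
          ring
        have h2 : (c :: rest).count c = rest.count c + 1 := by
          rw [List.count_cons]; simp
        rw [Bool.eq_iff_iff]
        simp only [Bool.or_eq_true, Bool.and_eq_true, decide_eq_true_eq, h1, h2]
        push_cast
        constructor <;> rintro ⟨g1, g2⟩ <;> exact ⟨g1, by omega⟩
      · rw [if_neg hall]
        rcases hm : (PySem.Set.ofList rest).filter (fun x => !(x == c) && !(x == a)) with _ | ⟨d, t⟩
        · exfalso
          apply hall
          intro x hx
          have hpx := List.filter_eq_nil_iff.mp hm x ((PySem.Set.mem_ofList rest x).mpr hx)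
          by_contra hcx
          push Not at hcx
          simp [hcx.1, hcx.2] at hpx
        · rfl

theorem pv_B_spec (L : List Int) : fAltLoop L none none 0 0 = pvSpecB L := by
  cases L with
  | nil => rfl
  | cons c rest =>
    rw [show fAltLoop (c :: rest) none none 0 0 = fAltLoop rest (some c) none 1 0 from by
      simp [fAltLoop]]
    rw [pv_loop1]
    unfold pvSpecB
    rw [PySem.Set.ofList_cons, pv_discard_filter]
    rcases hm : (PySem.Set.ofList rest).filter (fun x => !(x == c)) with _ | ⟨b, _ | t⟩
    · rfl
    · have hbc : ¬ (b = c) := by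
        have := List.of_mem_filter (l := PySem.Set.ofList rest) (p := fun x => !(x == c)) (a := b) (by rw [hm]; simp)
        simpa using this
      have h1 : (c :: rest).count c = rest.count c + 1 := by rw [List.count_cons]; simp
      have h2 : (c :: rest).count b = rest.count b := by
        rw [List.count_cons]
        simp only [beq_iff_eq]
        rw [if_neg (fun h : c = b => hbc h.symm)]
        ring
      rw [Bool.eq_iff_iff]
      simp only [Bool.or_eq_true, Bool.and_eq_true, decide_eq_true_eq, h1, h2]
      push_cast
      constructor <;> rintro ⟨g1, g2⟩ <;> exact ⟨g1, by omega⟩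
    · rfl

-- ===== VERDICT (by name: the statement is the Claim_ definition above) =====
theorem f_spec : Claim_equal_f := by
  intro s _
  unfold Spec_f f f_alt
  rw [pv_B_spec]
  exact pv_A_spec _ (fun x hx => pv_counts_pos s.toList x hx)
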